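-- pv_equiv track=rewrite | github.com/pramitmallick/spinn | python/spinn/data/sst/base.py | balanced_transitions
-- ===== SOURCE A (Python) =====
-- def balanced_transitions(N):
--     """
--     Recursively creates a balanced binary tree with N
--     leaves using shift reduce transitions.
--     """
--     if N == 3:
--         return [0, 0, 1, 0, 1]
--     elif N == 2:
--         return [0, 0, 1]
--     elif N == 1:
--         return [0]
--     else:
--         right_N = N // 2
--         left_N = N - right_N
--         return balanced_transitions(left_N) + balanced_transitions(right_N) + [1]
-- ===== SOURCE B (Python) =====
-- def balanced_transitions(N):
--     """
--     Recursively creates a balanced binary tree with N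
--     leaves using shift reduce transitions.
--     """
--     def build(n):
--         # explicit tree: None = leaf, (left, right) = internal node
--         if n == 1:
--             return None
--         right_n = n // 2
--         return (build(n - right_n), build(right_n))
--     out = []
--     def post(t):
--         if t is None:
--             out.append(0)
--         else:
--             post(t[0])
--             post(t[1])
--             out.append(1)
--     post(build(N))
--     return out
-- ===== Notes on version B (the rewrite author's own statement) =====
-- stated objective: alternative
-- what changed: B first materialises the balanced binary tree as an explicit nested structure (one recursive build pass), then emits the shift/reduce transitions in a separate post-order traversal into an accumulator, instead of A's single recursion that concatenates transition sublists with extra small base cases.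
import Mathlib
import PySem

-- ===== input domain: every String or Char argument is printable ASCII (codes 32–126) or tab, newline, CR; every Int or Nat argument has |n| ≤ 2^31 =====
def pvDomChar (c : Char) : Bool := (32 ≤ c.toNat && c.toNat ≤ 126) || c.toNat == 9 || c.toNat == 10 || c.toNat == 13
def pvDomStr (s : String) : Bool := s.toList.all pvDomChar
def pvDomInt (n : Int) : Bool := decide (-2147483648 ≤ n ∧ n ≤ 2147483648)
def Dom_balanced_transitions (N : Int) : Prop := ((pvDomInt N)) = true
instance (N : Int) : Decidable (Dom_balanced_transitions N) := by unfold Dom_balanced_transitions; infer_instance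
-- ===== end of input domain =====

-- B builds an explicit balanced binary tree, then emits transitions by a separate
-- post-order traversal (alternative decomposition; A concatenates sublists recursively).


-- ===== PORT A =====
-- literal transliteration of A; on N ≤ 0 Python's recursion never terminates
-- (RecursionError), which lies outside Pre_; the 'N ≤ 0 → []' guard only makes
-- the Lean function total there.
def balanced_transitions (N : Int) : List Int :=
  if N = 3 then [0, 0, 1, 0, 1]
  else if N = 2 then [0, 0, 1]
  else if N = 1 then [0]
  else if N ≤ 0 then []  -- totality guard, outside Pre_
  else
    let right_N := PySem.Int.floordiv N 2
    let left_N := N - right_N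
    balanced_transitions left_N ++ balanced_transitions right_N ++ [1]
termination_by N.toNat
decreasing_by
  all_goals
    simp only [PySem.Int.floordiv_eq_ediv_of_pos (by omega : (0:Int) < 2)] at *
    omega

-- ===== PORT B =====
-- explicit tree: leaf = single leaf, node l r = internal node
inductive PvTree : Type
  | leaf : PvTree
  | node : PvTree → PvTree → PvTree
deriving DecidableEq, Repr

-- build(n) from Source B; on n ≤ 0 Python recurses forever (RecursionError), outside
-- Pre_; the 'n ≤ 1 → leaf' guard only makes the Lean function total there.
def pvBuild (n : Int) : PvTree :=
  if n ≤ 1 then .leaf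
  else
    let right_n := PySem.Int.floordiv n 2
    .node (pvBuild (n - right_n)) (pvBuild right_n)
termination_by n.toNat
decreasing_by
  all_goals
    simp only [PySem.Int.floordiv_eq_ediv_of_pos (by omega : (0:Int) < 2)] at *
    omega

-- post(t) with the accumulator list 'out' from Source B
def pvPost (t : PvTree) (out : List Int) : List Int :=
  match t with
  | .leaf => out ++ [0]
  | .node l r => pvPost r (pvPost l out) ++ [1]

def balanced_transitions_alt (N : Int) : List Int :=
  pvPost (pvBuild N) []

-- ===== PRECONDITION & SPEC =====
-- Pre_ excludes exactly N ≤ 0, where both Pythons raise RecursionError.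
def Pre_balanced_transitions (N : Int) : Prop := 1 ≤ N
instance (N : Int) : Decidable (Pre_balanced_transitions N) := by unfold Pre_balanced_transitions; infer_instance
def pvWitness_balanced_transitions : Int := (5)

def Spec_balanced_transitions (N : Int) (out : List Int) : Prop := out = balanced_transitions_alt N
instance (N : Int) (out : List Int) : Decidable (Spec_balanced_transitions N out) := by unfold Spec_balanced_transitions; infer_instance

-- ===== CLAIM (what is proved, stated in full; the proofs are below) =====
def Claim_equal_balanced_transitions : Prop := ∀ (N : Int), Dom_balanced_transitions N → Pre_balanced_transitions N → Spec_balanced_transitions N (balanced_transitions N)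

-- ===== LEMMAS AND PROOFS =====

-- post-order with an accumulator prepends the accumulator
theorem pvPost_acc (t : PvTree) (out : List Int) : pvPost t out = out ++ pvPost t [] := by
  induction t generalizing out with
  | leaf => simp [pvPost]
  | node l r ihl ihr =>
      simp only [pvPost]
      rw [ihl, ihr, ihr (pvPost l [])]
      simp

theorem pv_main (n : Nat) (N : Int) (h1 : 1 ≤ N) (hn : N.toNat = n) :
    balanced_transitions N = pvPost (pvBuild N) [] := by
  induction n using Nat.strong_induction_on generalizing N with
  | _ n ih =>
    have hfd2 : PySem.Int.floordiv 2 2 = 1 := by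
      rw [PySem.Int.floordiv_eq_ediv_of_pos (by norm_num)]; decide
    have hfd3 : PySem.Int.floordiv 3 2 = 1 := by
      rw [PySem.Int.floordiv_eq_ediv_of_pos (by norm_num)]; decide
    have hb1 : pvBuild 1 = PvTree.leaf := by rw [pvBuild]; norm_num
    have hb2 : pvBuild 2 = PvTree.node PvTree.leaf PvTree.leaf := by
      rw [pvBuild]; norm_num [hfd2, hb1]
    by_cases h3 : N = 3
    · subst h3
      rw [balanced_transitions, pvBuild]
      norm_num [hfd3, hb1, hb2, pvPost]
    · by_cases h2 : N = 2
      · subst h2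
        rw [balanced_transitions]
        norm_num [hb2, pvPost]
      · by_cases hone : N = 1
        · subst hone
          rw [balanced_transitions]
          norm_num [hb1, pvPost]
        · have hN4 : 4 ≤ N := by omega
          have hfd : PySem.Int.floordiv N 2 = N / 2 :=
            PySem.Int.floordiv_eq_ediv_of_pos (by omega)
          rw [balanced_transitions, pvBuild]
          simp only [h3, h2, hone, if_false, if_neg (by omega : ¬ N ≤ 0),
            if_neg (by omega : ¬ N ≤ 1), hfd]
          rw [ih (N - N / 2).toNat (by omega) _ (by omega) rfl,
              ih (N / 2).toNat (by omega) _ (by omega) rfl]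
          simp only [pvPost]
          rw [pvPost_acc (pvBuild (N / 2)) (pvPost (pvBuild (N - N / 2)) [])]

-- ===== VERDICT (by name: the statement is the Claim_ definition above) =====
theorem balanced_transitions_spec : Claim_equal_balanced_transitions := by
  intro N _ hpre
  unfold Spec_balanced_transitions balanced_transitions_alt
  exact pv_main N.toNat N hpre rfl
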